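-- pv_equiv track=rewrite | github.com/freeeve/city | client.py | _on_horizontal_road
-- ===== SOURCE A (Python) =====
-- ROAD_THICK = 36
--
-- ROW_HEIGHT = 160
--
-- RESIDENTIAL_Y_START = 402 * 6  # Below all 6 commercial sections (2412)
--
-- def _on_horizontal_road(world_y):
--     """Check if a y position falls on a horizontal road."""
--     pad = 20  # buffer for lamp/object height
--     section_h = ROW_HEIGHT * 2 + ROAD_THICK + 16
--     for section in range(8):
--         road_y = section * section_h + ROW_HEIGHT * 2 - 15
--         if road_y > RESIDENTIAL_Y_START - 50:
--             break
--         if world_y + pad > road_y - pad and world_y - pad < road_y + ROAD_THICK + pad: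
--             return True
--     return False
-- ===== SOURCE B (Python) =====
-- def _on_horizontal_road(world_y):
--     """Check if a y position falls on a horizontal road (direct band lookup)."""
--     # Roads sit at road_y = 305 + 372*s for s in 0..5; the match window is
--     # road_y - 40 < world_y < road_y + 76, i.e. world_y - 266 within [0, 114] mod 372.
--     q, r = divmod(world_y - 266, 372)
--     return 0 <= q <= 5 and r < 115
-- ===== Notes on version B (the rewrite author's own statement) =====
-- stated objective: simpler
-- what changed: Replaces the fixed scan over road sections with one divmod band lookup: quotient picks the section, remainder checks the window.
import Mathlib
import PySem

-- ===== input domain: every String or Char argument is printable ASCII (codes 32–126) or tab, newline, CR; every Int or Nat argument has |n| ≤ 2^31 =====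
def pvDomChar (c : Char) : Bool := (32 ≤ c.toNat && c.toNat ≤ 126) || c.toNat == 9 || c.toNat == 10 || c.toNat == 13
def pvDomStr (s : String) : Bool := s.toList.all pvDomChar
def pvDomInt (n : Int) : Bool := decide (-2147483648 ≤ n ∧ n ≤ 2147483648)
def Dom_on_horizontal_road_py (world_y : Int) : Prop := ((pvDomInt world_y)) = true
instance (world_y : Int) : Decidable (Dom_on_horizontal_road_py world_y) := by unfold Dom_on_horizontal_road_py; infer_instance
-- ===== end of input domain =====

-- B replaces A's fixed scan over road sections by a single divmod band lookup (objective: simpler).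


-- ===== PORT A =====
-- the for-loop over range(8) with its break and early return
def onHRoadLoop (world_y pad section_h : Int) : List Int → Bool
  | [] => false
  | sec :: rest =>
    let road_y := sec * section_h + 160 * 2 - 15
    if road_y > 402 * 6 - 50 then false
    else if world_y + pad > road_y - pad ∧ world_y - pad < road_y + 36 + pad then true
    else onHRoadLoop world_y pad section_h rest

def on_horizontal_road_py (world_y : Int) : Bool :=
  let pad : Int := 20
  let section_h : Int := 160 * 2 + 36 + 16
  onHRoadLoop world_y pad section_h (PySem.List.pyRange 0 8 1)

-- ===== PORT B =====
def on_horizontal_road_py_alt (world_y : Int) : Bool :=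
  let q := PySem.Int.floordiv (world_y - 266) 372
  let r := PySem.Int.mod (world_y - 266) 372
  decide (0 ≤ q ∧ q ≤ 5) && decide (r < 115)

-- ===== PRECONDITION & SPEC =====
def Spec_on_horizontal_road_py (world_y : Int) (out : Bool) : Prop := out = on_horizontal_road_py_alt world_y
instance (world_y : Int) (out : Bool) : Decidable (Spec_on_horizontal_road_py world_y out) := by unfold Spec_on_horizontal_road_py; infer_instance

-- ===== CLAIM (what is proved, stated in full; the proofs are below) =====
def Claim_equal_on_horizontal_road_py : Prop := ∀ (world_y : Int), Dom_on_horizontal_road_py world_y → Spec_on_horizontal_road_py world_y (on_horizontal_road_py world_y)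

-- ===== LEMMAS AND PROOFS =====
theorem pyRange_eight : PySem.List.pyRange 0 8 1 = [0, 1, 2, 3, 4, 5, 6, 7] := by decide

-- ===== VERDICT (by name: the statement is the Claim_ definition above) =====
theorem on_horizontal_road_py_spec : Claim_equal_on_horizontal_road_py := by
  intro wy _
  unfold Spec_on_horizontal_road_py
  have h1 : PySem.Int.floordiv (wy - 266) 372 = (wy - 266) / 372 :=
    PySem.Int.floordiv_eq_ediv_of_pos (by norm_num)
  have h2 : PySem.Int.mod (wy - 266) 372 = (wy - 266) % 372 :=
    PySem.Int.mod_eq_emod_of_pos (by norm_num)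
  simp only [on_horizontal_road_py, on_horizontal_road_py_alt, pyRange_eight, onHRoadLoop,
    h1, h2]
  norm_num
  rw [Bool.eq_iff_iff]
  simp only [Bool.or_eq_true, Bool.and_eq_true, decide_eq_true_iff]
  omega
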